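-- pv_equiv track=rewrite | github.com/TheRealMarcusChiu/real-time-systems-homework-two | src/main/java/main.py | mao
-- ===== SOURCE A (Python) =====
-- def dist_function(g, chosen, next_vertices):
--     path_sum = 0
--     for i in range(len(chosen)):
--         path_sum += g[next_vertices][chosen[i]]
--     return path_sum
--
-- def possible(g, chosen):
--     possible_vertices = []
--     for i in range(len(g)):
--         if i not in chosen:
--             possible_vertices.append(i)
--     return possible_vertices
--
-- def mao(g):
--     chosen = [0]
--     while len(chosen) != len(g):
--         possible_vertices = possible(g, chosen)
--         next_vertex = possible_vertices[0]
--         vertex_to_chosen = dist_function(g, chosen, next_vertex)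
--         for i in range(len(possible_vertices)):
--             possible_vertex = possible_vertices[i]
--             val = dist_function(g, chosen, possible_vertex)
--             if val > vertex_to_chosen:
--                 vertex_to_chosen = val
--                 next_vertex = possible_vertex
--         chosen.append(next_vertex)
--     return chosen
-- ===== SOURCE B (Python) =====
-- def mao(g):
--     n = len(g)
--     chosen = [0]
--     cset = {0}
--     w = [row[0] for row in g]
--     for _ in range(n - 1):
--         best = -1
--         for v in range(n):
--             if v not in cset and (best < 0 or w[v] > w[best]):
--                 best = v
--         chosen.append(best)
--         cset.add(best)
--         w = [w[v] + g[v][best] for v in range(n)]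
--     return chosen
-- ===== Notes on version B (the rewrite author's own statement) =====
-- stated objective: faster
-- what changed: Instead of recomputing each candidate's distance-to-chosen sum from scratch every iteration (plus rebuilding the possible-vertex list by membership scans), B maintains an incremental weight array w[v] = sum of g[v][c] over chosen c, updated in O(V) when a vertex is chosen, and a set for O(1) membership, turning each iteration into a single O(V) argmax scan.
-- outside the precondition, e.g. on mao([[0, 1], [5]]): A returns [0, 1], B raises IndexError
import Mathlib
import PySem

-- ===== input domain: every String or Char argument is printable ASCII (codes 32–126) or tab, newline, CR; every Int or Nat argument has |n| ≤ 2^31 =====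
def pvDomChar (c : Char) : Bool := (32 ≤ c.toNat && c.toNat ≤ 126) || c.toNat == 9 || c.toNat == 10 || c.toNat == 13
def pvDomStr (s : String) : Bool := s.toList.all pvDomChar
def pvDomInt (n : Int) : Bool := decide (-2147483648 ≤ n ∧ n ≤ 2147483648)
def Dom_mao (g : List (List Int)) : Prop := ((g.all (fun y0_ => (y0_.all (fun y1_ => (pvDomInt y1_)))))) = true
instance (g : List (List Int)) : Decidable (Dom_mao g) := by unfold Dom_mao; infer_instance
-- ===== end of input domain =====

-- B replaces A's per-iteration recomputation of every candidate's distance-to-chosen sum by an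
-- incrementally maintained weight array and a chosen-set, one argmax scan per iteration
-- (measurably faster); equal return values on Pre_mao.

-- ===== PORT A =====
def distA (g : List (List Int)) (chosen : List Int) (v : Int) : Int :=
  chosen.foldl (fun s c => s + PySem.List.pyGetD (PySem.List.pyGetD g v []) c 0) 0

def possA (g : List (List Int)) (chosen : List Int) : List Int :=
  (PySem.List.pyRange 0 (g.length : Int) 1).filter (fun i => !(chosen.contains i))

def maoLoopA (g : List (List Int)) : Nat → List Int → List Int
  | 0, chosen => chosen
  | Nat.succ k, chosen =>
    match possA g chosen with
    | [] => chosen   -- Python raises IndexError here; excluded by Pre_mao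
    | p0 :: rest =>
      let sel := (p0 :: rest).foldl
        (fun b pv =>
          let val := distA g chosen pv
          if b.2 < val then (pv, val) else b)
        (p0, distA g chosen p0)
      maoLoopA g k (chosen ++ [sel.1])

def mao (g : List (List Int)) : List Int := maoLoopA g (g.length - 1) [0]

-- ===== PORT B =====
def selB (cset : PySem.Set Int) (w : List Int) (n : Nat) : Int :=
  (PySem.List.pyRange 0 (n : Int) 1).foldl
    (fun best v =>
      if PySem.Set.contains cset v = false ∧
          (best < 0 ∨ PySem.List.pyGetD w best 0 < PySem.List.pyGetD w v 0)
      then v else best)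
    (-1)

def maoLoopB (g : List (List Int)) (n : Nat) : Nat → List Int → PySem.Set Int → List Int → List Int
  | 0, chosen, _, _ => chosen
  | Nat.succ k, chosen, cset, w =>
    let best := selB cset w n
    maoLoopB g n k (chosen ++ [best]) (PySem.Set.add cset best)
      ((PySem.List.pyRange 0 (n : Int) 1).map (fun v =>
        PySem.List.pyGetD w v 0 + PySem.List.pyGetD (PySem.List.pyGetD g v []) best 0))

def mao_alt (g : List (List Int)) : List Int :=
  maoLoopB g g.length (g.length - 1) [0] (PySem.Set.ofList [0])
    (g.map (fun row => PySem.List.pyGetD row 0 0))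

-- ===== PRECONDITION & SPEC =====
-- Pre_mao excludes the empty matrix (A raises IndexError) and matrices with a row shorter than
-- the vertex count, on which A raises IndexError or, when A happens to return, B's own extra
-- column accesses raise IndexError.
def Pre_mao (g : List (List Int)) : Prop := g ≠ [] ∧ ∀ row ∈ g, g.length ≤ row.length
instance (g : List (List Int)) : Decidable (Pre_mao g) := by unfold Pre_mao; infer_instance
def pvWitness_mao : List (List Int) := [[0, 2], [2, 0]]

def Spec_mao (g : List (List Int)) (out : List Int) : Prop := out = mao_alt g
instance (g : List (List Int)) (out : List Int) : Decidable (Spec_mao g out) := by unfold Spec_mao; infer_instance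

-- ===== CLAIM (what is proved, stated in full; the proofs are below) =====
def Claim_equal_mao : Prop := ∀ (g : List (List Int)), Dom_mao g → Pre_mao g → Spec_mao g (mao g)

-- ===== LEMMAS AND PROOFS =====

-- appending a vertex to chosen adds one matrix entry to the distance sum
theorem distA_append (g : List (List Int)) (chosen : List Int) (c v : Int) :
    distA g (chosen ++ [c]) v = distA g chosen v + PySem.List.pyGetD (PySem.List.pyGetD g v []) c 0 := by
  simp [distA, List.foldl_append]

-- elements of possA are in range and unchosen
theorem mem_possA (g : List (List Int)) (chosen : List Int) (x : Int) (hx : x ∈ possA g chosen) :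
    (0 ≤ x ∧ x < (g.length : Int)) ∧ x ∉ chosen := by
  simp [possA, List.mem_filter, PySem.List.mem_pyRange_one] at hx
  exact ⟨⟨hx.1.1, hx.1.2⟩, hx.2⟩

-- the possible list is nonempty while some vertex is unchosen
theorem possA_ne_nil (g : List (List Int)) (chosen : List Int)
    (hlen : chosen.length < g.length) :
    possA g chosen ≠ [] := by
  intro h
  have hsub : PySem.List.pyRange 0 (g.length : Int) 1 ⊆ chosen := by
    intro x hx
    by_contra hxc
    have : x ∈ possA g chosen := by
      simp [possA, List.mem_filter, hx, hxc]
    simp [h] at this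
  have hnd' := PySem.List.nodup_pyRange_one (a := 0) (b := (g.length : Int))
  have hle := (List.subperm_of_subset hnd' hsub).length_le
  rw [PySem.List.length_pyRange_one] at hle
  omega

-- A's argmax fold result is the initial vertex or one of the scanned ones
theorem foldA_mem (g : List (List Int)) (chosen : List Int) (rest : List Int) (b val : Int) :
    (rest.foldl (fun b pv =>
        let v := distA g chosen pv
        if b.2 < v then (pv, v) else b) (b, val)).1 = b ∨
    (rest.foldl (fun b pv =>
        let v := distA g chosen pv
        if b.2 < v then (pv, v) else b) (b, val)).1 ∈ rest := by
  induction rest generalizing b val with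
  | nil => simp
  | cons r rs ih =>
    simp only [List.foldl_cons]
    by_cases h : val < distA g chosen r
    · rcases ih r (distA g chosen r) with h1 | h1 <;> simp [h, h1]
    · rcases ih b val with h1 | h1 <;> simp [h, h1]

-- A's (vertex, value) argmax fold agrees with B's vertex-only fold over the weight array
theorem sel_bridge (g : List (List Int)) (chosen : List Int) (w : List Int)
    (hw : ∀ v : Int, 0 ≤ v → v < (g.length : Int) → PySem.List.pyGetD w v 0 = distA g chosen v)
    (rest : List Int) (hrest : ∀ r ∈ rest, 0 ≤ r ∧ r < (g.length : Int))
    (b val : Int) (hb0 : 0 ≤ b) (hbn : b < (g.length : Int)) (hval : val = distA g chosen b) :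
    (rest.foldl (fun b pv =>
        let v := distA g chosen pv
        if b.2 < v then (pv, v) else b) (b, val)).1 =
    rest.foldl (fun best v =>
        if best < 0 ∨ PySem.List.pyGetD w best 0 < PySem.List.pyGetD w v 0
        then v else best) b := by
  induction rest generalizing b val with
  | nil => simp
  | cons r rs ih =>
    have hr := hrest r (by simp)
    have hcond : (b < 0 ∨ PySem.List.pyGetD w b 0 < PySem.List.pyGetD w r 0) ↔ val < distA g chosen r := by
      rw [hw b hb0 hbn, hw r hr.1 hr.2, hval]
      constructor
      · rintro (h | h)
        · omega
        · exact h
      · intro h; exact Or.inr h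
    simp only [List.foldl_cons]
    by_cases h : val < distA g chosen r
    · rw [if_pos (hcond.mpr h)]
      simp only [h, if_pos]
      exact ih (fun x hx => hrest x (by simp [hx])) r (distA g chosen r) hr.1 hr.2 rfl
    · rw [if_neg (fun hc => h (hcond.mp hc))]
      simp only [h, if_neg, not_false_iff]
      exact ih (fun x hx => hrest x (by simp [hx])) b val hb0 hbn hval

-- B's whole scan (with the membership test and the -1 sentinel) equals A's fold over possA
theorem selB_eq (g : List (List Int)) (chosen : List Int) (cset : PySem.Set Int) (w : List Int)
    (hset : ∀ x : Int, x ∈ cset ↔ x ∈ chosen)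
    (hw : ∀ v : Int, 0 ≤ v → v < (g.length : Int) → PySem.List.pyGetD w v 0 = distA g chosen v)
    (p0 : Int) (rest : List Int) (hposs : possA g chosen = p0 :: rest) :
    selB cset w g.length =
    ((p0 :: rest).foldl (fun b pv =>
        let v := distA g chosen pv
        if b.2 < v then (pv, v) else b) (p0, distA g chosen p0)).1 := by
  have hcont : ∀ v : Int, PySem.Set.contains cset v = chosen.contains v := by
    intro v
    rw [PySem.Set.contains_eq_listContains]
    by_cases hv : v ∈ chosen
    · rw [List.contains_iff_mem.mpr hv, List.contains_iff_mem.mpr ((hset v).mpr hv)]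
    · have h1 : (List.contains cset v) = false := by
        by_contra hc
        exact hv ((hset v).mp (List.contains_iff_mem.mp (by simpa using hc)))
      have h2 : (chosen.contains v) = false := by
        by_contra hc
        exact hv (List.contains_iff_mem.mp (by simpa using hc))
      rw [h1, h2]
  have hfun : selB cset w g.length =
      (PySem.List.pyRange 0 (g.length : Int) 1).foldl
        (fun best v =>
          if (!(chosen.contains v)) = true then
            (if best < 0 ∨ PySem.List.pyGetD w best 0 < PySem.List.pyGetD w v 0 then v else best)
          else best) (-1) := by
    unfold selB
    congr 1
    funext best v
    rw [hcont v]
    by_cases h1 : v ∈ chosen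
    · simp [h1]
    · simp [h1]
  rw [hfun, ← List.foldl_filter]
  show (possA g chosen).foldl _ _ = _
  rw [hposs]
  have hp0 := mem_possA g chosen p0 (by rw [hposs]; exact List.mem_cons_self)
  simp only [List.foldl_cons]
  rw [if_pos (Or.inl (by norm_num))]
  rw [if_neg (lt_irrefl (distA g chosen p0))]
  exact (sel_bridge g chosen w hw rest
    (fun r hr => (mem_possA g chosen r (by rw [hposs]; exact List.mem_cons_of_mem _ hr)).1)
    p0 (distA g chosen p0) hp0.1.1 hp0.1.2 rfl).symm

-- main loop invariant: the two loops produce the same chosen list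
theorem loop_eq (g : List (List Int)) :
    ∀ (k : Nat) (chosen : List Int) (cset : PySem.Set Int) (w : List Int),
      chosen.Nodup →
      (∀ c ∈ chosen, 0 ≤ c ∧ c < (g.length : Int)) →
      chosen.length + k = g.length →
      (∀ x : Int, x ∈ cset ↔ x ∈ chosen) →
      (∀ v : Int, 0 ≤ v → v < (g.length : Int) → PySem.List.pyGetD w v 0 = distA g chosen v) →
      maoLoopA g k chosen = maoLoopB g g.length k chosen cset w := by
  intro k
  induction k with
  | zero => intro chosen cset w _ _ _ _ _; rfl
  | succ k ih =>
    intro chosen cset w hnd hbd hlen hset hw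
    have hposs := possA_ne_nil g chosen (by omega)
    obtain ⟨p0, rest, hp⟩ : ∃ p0 rest, possA g chosen = p0 :: rest := by
      cases h : possA g chosen with
      | nil => exact absurd h hposs
      | cons a t => exact ⟨a, t, rfl⟩
    have hsel := selB_eq g chosen cset w hset hw p0 rest hp
    set selA := ((p0 :: rest).foldl (fun b pv =>
        let v := distA g chosen pv
        if b.2 < v then (pv, v) else b) (p0, distA g chosen p0)).1 with hselA
    have hsel2 : selA = (rest.foldl (fun b pv =>
        let v := distA g chosen pv
        if b.2 < v then (pv, v) else b) (p0, distA g chosen p0)).1 := by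
      rw [hselA]
      simp only [List.foldl_cons, lt_self_iff_false, if_false]
    have hmem : selA ∈ possA g chosen := by
      rw [hp]
      rcases foldA_mem g chosen rest p0 (distA g chosen p0) with h | h
      · rw [hsel2, h]; exact List.mem_cons_self
      · exact List.mem_cons_of_mem _ (hsel2 ▸ h)
    have hsp := mem_possA g chosen selA hmem
    simp only [maoLoopA, hp, maoLoopB]
    rw [hsel]
    exact ih (chosen ++ [selA]) _ _
      (by simp [List.nodup_append, hnd]
          intro a ha h
          exact hsp.2 (h ▸ ha))
      (by intro c hc
          rcases List.mem_append.mp hc with h | h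
          · exact hbd c h
          · simp at h; subst h; exact hsp.1)
      (by simp; omega)
      (by intro x
          rw [PySem.Set.mem_add]
          simp [hset x])
      (by intro v hv0 hvn
          rw [PySem.List.pyGetD_map_pyRange_of_nonneg _ _ _ _ hv0 hvn]
          rw [distA_append, hw v hv0 hvn])

-- ===== VERDICT (by name: the statement is the Claim_ definition above) =====
theorem mao_spec : Claim_equal_mao := by
  intro g _ hpre
  unfold Spec_mao mao mao_alt
  have hn : 1 ≤ g.length := by
    cases g with
    | nil => exact absurd rfl hpre.1
    | cons a t => simp
  refine loop_eq g (g.length - 1) [0] (PySem.Set.ofList [0]) (g.map (fun row => PySem.List.pyGetD row 0 0)) ?_ ?_ ?_ ?_ ?_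
  · simp
  · intro c hc; simp at hc; subst hc; exact ⟨le_refl 0, by exact_mod_cast hn⟩
  · simp; omega
  · intro x; simp [PySem.Set.ofList]
  · intro v hv0 hvn
    have hvlt : v.toNat < g.length := by omega
    rw [PySem.List.pyGetD_eq_getElem _ 0 hv0 (by simpa using hvn)]
    simp only [distA, List.foldl_cons, List.foldl_nil, zero_add]
    rw [PySem.List.pyGetD_eq_getElem _ ([] : List Int) hv0 hvn]
    simp
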